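-- pv_equiv track=rewrite | github.com/rerobots/docs | tools/gen.py | get_ogheader
-- ===== SOURCE A (Python) =====
-- def get_ogheader(blob, url=None):
--     """extract Open Graph markup into a dict
--
--     The OG header section is delimited by a line of only `---`.
--
--     Note that the page title is not provided as Open Graph metadata if
--     the image metadata is not specified.
--     """
--     found = False
--     ogheader = dict()
--     for line in blob.split('\n'):
--         if line == '---':
--             found = True
--             break
--         if line.startswith('image: '):
--             toks = line.split()
--             assert len(toks) == 2
--             ogheader['image'] = toks[1]
--     if not found:
--         ogheader = dict()  # Ignore any matches as false positives
--         return ogheader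
--     if url is not None:
--         assert 'url' not in ogheader
--         ogheader['url'] = url
--     for line in blob.split('\n'):
--         if line.startswith('# '):
--             ogheader['title'] = line[2:]
--     return ogheader
-- ===== SOURCE B (Python) =====
-- def get_ogheader(blob, url=None):
--     """extract Open Graph markup into a dict (single pass, assemble at end)"""
--     found = False
--     image = None
--     title = None
--     for line in blob.split('\n'):
--         if not found:
--             if line == '---':
--                 found = True
--             elif line.startswith('image: '):
--                 toks = line.split()
--                 assert len(toks) == 2
--                 image = toks[1]
--         if line.startswith('# '):
--             title = line[2:]
--     if not found:
--         return dict()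
--     ogheader = dict()
--     if image is not None:
--         ogheader['image'] = image
--     if url is not None:
--         ogheader['url'] = url
--     if title is not None:
--         ogheader['title'] = title
--     return ogheader
-- ===== Notes on version B (the rewrite author's own statement) =====
-- stated objective: alternative
-- what changed: A splits the blob twice and makes two sequential passes that mutate a dict incrementally; B splits once and makes a single pass maintaining (found, image, title) scalar state, assembling the dict only at the end; Pre_ excludes the inputs on which A (and B) raise AssertionError on a malformed 'image: ' line before the delimiter.
import Mathlib
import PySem

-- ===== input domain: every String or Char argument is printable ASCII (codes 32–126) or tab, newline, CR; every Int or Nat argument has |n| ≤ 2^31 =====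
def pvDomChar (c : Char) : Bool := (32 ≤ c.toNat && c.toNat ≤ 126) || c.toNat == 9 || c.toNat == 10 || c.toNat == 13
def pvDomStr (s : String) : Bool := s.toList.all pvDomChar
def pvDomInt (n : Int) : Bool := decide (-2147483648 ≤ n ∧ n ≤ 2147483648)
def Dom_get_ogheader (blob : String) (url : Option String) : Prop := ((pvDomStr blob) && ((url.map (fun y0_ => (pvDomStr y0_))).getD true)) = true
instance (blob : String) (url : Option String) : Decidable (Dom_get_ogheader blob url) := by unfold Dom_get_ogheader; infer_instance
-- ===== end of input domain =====

-- B replaces A's two sequential passes (and double split) by one split and one pass over the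
-- lines with (found, image, title) state, assembling the dict at the end (objective: alternative).


-- ===== PORT A =====
-- first loop of A: scans lines until '---', collecting ogheader['image']
-- (toks[1] is ported with pyGetD; Pre_ guarantees len(toks) == 2, exactly A's assert)
def ogLoop1 : List String → PySem.Dict String String → Bool × PySem.Dict String String
  | [], d => (false, d)
  | l :: rest, d =>
    if l = "---" then (true, d)
    else if PySem.Str.startswith l "image: " then
      ogLoop1 rest (d.insert "image" (PySem.List.pyGetD (PySem.Str.split₀ l) 1 ""))
    else ogLoop1 rest d

-- second loop of A: ogheader['title'] = line[2:] on every '# ' line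
def ogTitleStep (d : PySem.Dict String String) (l : String) : PySem.Dict String String :=
  if PySem.Str.startswith l "# " then d.insert "title" (PySem.Str.slice l (some 2) none) else d

-- A calls blob.split('\n') twice; sep "\n" ≠ "", so split? is some: (split? blob "\n").getD [] is exact
def get_ogheader (blob : String) (url : Option String) : List (String × String) :=
  match ogLoop1 ((PySem.Str.split? blob "\n").getD []) PySem.Dict.empty with
  | (false, _) => []                                   -- not found: return dict()
  | (true, d) =>
    let d := match url with
      | some u => d.insert "url" u                     -- assert 'url' not in ogheader cannot fire: keys ⊆ {'image'}
      | none => d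
    (((PySem.Str.split? blob "\n").getD []).foldl ogTitleStep d).items

-- ===== PORT B =====
-- one step of B's single loop over the lines, state (found, image, title)
def ogStep (st : Bool × Option String × Option String) (l : String) : Bool × Option String × Option String :=
  let (found, image, title) := st
  let (found, image) :=
    if !found then
      if l = "---" then (true, image)
      else if PySem.Str.startswith l "image: " then
        (found, some (PySem.List.pyGetD (PySem.Str.split₀ l) 1 ""))
      else (found, image)
    else (found, image)
  let title := if PySem.Str.startswith l "# " then some (PySem.Str.slice l (some 2) none) else title
  (found, image, title)

def get_ogheader_alt (blob : String) (url : Option String) : List (String × String) :=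
  match ((PySem.Str.split? blob "\n").getD []).foldl ogStep (false, none, none) with
  | (false, _, _) => []
  | (true, image, title) =>
    (match image with | some v => [("image", v)] | none => [])
    ++ (match url with | some u => [("url", u)] | none => [])
    ++ (match title with | some t => [("title", t)] | none => [])

-- ===== PRECONDITION & SPEC =====
-- Pre_ excludes exactly the inputs where A raises AssertionError: a line before the first '---'
-- (or anywhere, if no '---' line exists) that starts with 'image: ' but does not split into
-- exactly two whitespace-separated tokens.
def Pre_get_ogheader (blob : String) (_url : Option String) : Prop :=
  ∀ l ∈ ((PySem.Str.split? blob "\n").getD []).takeWhile (· ≠ "---"),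
    PySem.Str.startswith l "image: " = true → (PySem.Str.split₀ l).length = 2
instance (blob : String) (url : Option String) : Decidable (Pre_get_ogheader blob url) := by
  unfold Pre_get_ogheader; infer_instance

def pvWitness_get_ogheader : String × Option String := ("image: pic.png\n---\n# Title", some "https://example.org")

def Spec_get_ogheader (blob : String) (url : Option String) (out : List (String × String)) : Prop := out = get_ogheader_alt blob url
instance (blob : String) (url : Option String) (out : List (String × String)) : Decidable (Spec_get_ogheader blob url out) := by unfold Spec_get_ogheader; infer_instance

-- ===== CLAIM (what is proved, stated in full; the proofs are below) =====
def Claim_equal_get_ogheader : Prop := ∀ (blob : String) (url : Option String), Dom_get_ogheader blob url → Pre_get_ogheader blob url → Spec_get_ogheader blob url (get_ogheader blob url)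

-- ===== LEMMAS AND PROOFS =====

-- last 'image: ' token among the lines before the first '---', starting from acc
def ogImgAux : Option String → List String → Option String
  | acc, [] => acc
  | acc, l :: rest =>
    if l = "---" then acc
    else ogImgAux (if PySem.Str.startswith l "image: " then
                     some (PySem.List.pyGetD (PySem.Str.split₀ l) 1 "") else acc) rest

-- last '# ' payload over all the lines, starting from acc
def ogTitAux (acc : Option String) (lines : List String) : Option String :=
  lines.foldl (fun a l => if PySem.Str.startswith l "# " then
                            some (PySem.Str.slice l (some 2) none) else a) acc

def ogWithT (d : PySem.Dict String String) : Option String → PySem.Dict String String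
  | none => d
  | some t => d.insert "title" t

theorem ogImgAux_or (lines : List String) : ∀ acc, ogImgAux acc lines = (ogImgAux none lines).or acc := by
  induction lines with
  | nil => intro acc; simp [ogImgAux]
  | cons l rest ih =>
    intro acc
    by_cases h : l = "---"
    · simp [ogImgAux, h]
    · by_cases h2 : PySem.Str.startswith l "image: "
      · simp only [ogImgAux, if_neg h, if_pos h2]
        rw [ih]
        cases ogImgAux none rest <;> rfl
      · simp only [ogImgAux, if_neg h, if_neg h2]
        exact ih acc

theorem ogLoop1_spec (lines : List String) : ∀ d, ogLoop1 lines d =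
    (lines.contains "---",
     match ogImgAux none lines with
     | none => d
     | some v => d.insert "image" v) := by
  induction lines with
  | nil => intro d; simp [ogLoop1, ogImgAux]
  | cons l rest ih =>
    intro d
    by_cases h : l = "---"
    · simp [ogLoop1, ogImgAux, h]
    · have hb : ("---" == l) = false := by simp [Ne.symm h]
      by_cases h2 : PySem.Str.startswith l "image: "
      · simp only [ogLoop1, if_neg h, if_pos h2, ogImgAux, List.contains_cons, hb, Bool.false_or]
        rw [ih, ogImgAux_or rest (some _)]
        cases ogImgAux none rest with
        | none => rfl
        | some w => simp [PySem.Dict.insert_insert_self]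
      · simp only [ogLoop1, if_neg h, if_neg h2, ogImgAux, List.contains_cons, hb, Bool.false_or]
        exact ih d

theorem ogFold_true (lines : List String) : ∀ i t, lines.foldl ogStep (true, i, t) =
    (true, i, ogTitAux t lines) := by
  induction lines with
  | nil => intro i t; simp [ogTitAux]
  | cons l rest ih => intro i t; simp only [List.foldl_cons, ogStep, ogTitAux] at *; exact ih i _

theorem ogFold_false (lines : List String) : ∀ i t, lines.foldl ogStep (false, i, t) =
    (lines.contains "---", ogImgAux i lines, ogTitAux t lines) := by
  induction lines with
  | nil => intro i t; simp [ogImgAux, ogTitAux]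
  | cons l rest ih =>
    intro i t
    simp only [List.foldl_cons, ogStep]
    by_cases h : l = "---"
    · have hb : ("---" == l) = true := by simp [h]
      simp only [if_pos h, Bool.not_false, if_true]
      rw [ogFold_true]
      simp only [List.contains_cons, hb, Bool.true_or, ogImgAux, if_pos h, ogTitAux,
        List.foldl_cons]
    · have hb : ("---" == l) = false := by simp [Ne.symm h]
      by_cases h2 : PySem.Str.startswith l "image: "
      · simp only [if_neg h, if_pos h2, Bool.not_false, if_true]
        rw [ih]
        simp only [List.contains_cons, hb, Bool.false_or, ogImgAux, if_neg h, if_pos h2, ogTitAux,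
          List.foldl_cons]
      · simp only [if_neg h, if_neg h2, Bool.not_false, if_true]
        rw [ih]
        simp only [List.contains_cons, hb, Bool.false_or, ogImgAux, if_neg h, if_neg h2, ogTitAux,
          List.foldl_cons]

theorem ogTitleFold (lines : List String) :
    ∀ (d : PySem.Dict String String) o, lines.foldl ogTitleStep (ogWithT d o) =
      ogWithT d (ogTitAux o lines) := by
  induction lines with
  | nil => intro d o; simp [ogTitAux]
  | cons l rest ih =>
    intro d o
    by_cases h2 : PySem.Str.startswith l "# "
    · simp only [List.foldl_cons, ogTitleStep, if_pos h2, ogTitAux]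
      have : (ogWithT d o).insert "title" (PySem.Str.slice l (some 2) none)
           = ogWithT d (some (PySem.Str.slice l (some 2) none)) := by
        cases o <;> simp [ogWithT, PySem.Dict.insert_insert_self]
      rw [this, ih]
      simp [ogTitAux]
    · simp only [List.foldl_cons, ogTitleStep, if_neg h2, ogTitAux]
      exact ih d o

theorem ogTitleFold' (lines : List String) (d : PySem.Dict String String) :
    lines.foldl ogTitleStep d = ogWithT d (ogTitAux none lines) :=
  ogTitleFold lines d none

-- ===== VERDICT (by name: the statement is the Claim_ definition above) =====
theorem get_ogheader_spec : Claim_equal_get_ogheader := by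
  intro blob url _ _
  unfold Spec_get_ogheader get_ogheader get_ogheader_alt
  rw [ogLoop1_spec, ogFold_false]
  cases hc : ((PySem.Str.split? blob "\n").getD []).contains "---"
  · rfl
  · cases hu : url <;> cases hi : ogImgAux none ((PySem.Str.split? blob "\n").getD []) <;>
      simp only [ogTitleFold'] <;>
      cases ht : ogTitAux none ((PySem.Str.split? blob "\n").getD []) <;>
      simp [ogWithT, PySem.Dict.items_insert_of_not_contains, PySem.Dict.contains_insert,
        PySem.Dict.empty]
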